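-- pv_equiv track=rewrite | github.com/basileaw/chatline-interface | chatline/animations.py | group_tokens_by_word
-- ===== SOURCE A (Python) =====
-- def group_tokens_by_word(tokens):
--     """
--     Group the token list into word groups. Each group is a tuple:
--       (group_type, tokens)
--     where group_type is 'word' (for non-space characters) or 'space' (for whitespace).
--     ANSI tokens are merged into the current group.
--     """
--     groups = []
--     current_group = []
--     current_type = None  # 'word' or 'space'
--     for token in tokens:
--         if token['type'] == 'ansi':
--             # ANSI tokens are added to the current group if it exists; otherwise, start a new 'word' group.
--             if current_group:
--                 current_group.append(token)
--             else:
--                 current_group = [token]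
--                 current_type = 'word'
--         else:  # token is a visible character
--             if token['value'].isspace():
--                 if current_group and current_type == 'space':
--                     current_group.append(token)
--                 elif current_group and current_type == 'word':
--                     groups.append((current_type, current_group))
--                     current_group = [token]
--                     current_type = 'space'
--                 else:
--                     current_group = [token]
--                     current_type = 'space'
--             else:
--                 if current_group and current_type == 'word':
--                     current_group.append(token)
--                 elif current_group and current_type == 'space':
--                     groups.append((current_type, current_group))
--                     current_group = [token]
--                     current_type = 'word'
--                 else:
--                     current_group = [token]
--                     current_type = 'word'
--     if current_group:
--         groups.append((current_type, current_group))
--     return groups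
-- ===== SOURCE B (Python) =====
-- def group_tokens_by_word(tokens):
--     # Stage 1: classify every token ('word'/'space'; ANSI inherits the running type, default 'word').
--     pairs = []
--     cur = None
--     for t in tokens:
--         if t['type'] == 'ansi':
--             cur = cur if cur is not None else 'word'
--         else:
--             cur = 'space' if t['value'].isspace() else 'word'
--         pairs.append((cur, t))
--     # Stage 2: cut the classified list into maximal same-type runs.
--     groups = []
--     i = 0
--     n = len(pairs)
--     while i < n:
--         ty = pairs[i][0]
--         j = i + 1
--         while j < n and pairs[j][0] == ty:
--             j += 1
--         groups.append((ty, [tok for _, tok in pairs[i:j]]))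
--         i = j
--     return groups
-- ===== Notes on version B (the rewrite author's own statement) =====
-- stated objective: alternative
-- what changed: Replaces the single stateful accumulator loop (current group/current type with four branch cases) by a classify-then-group pipeline: one pass assigns each token a type (ANSI inherits the running type, default 'word'), then a run-cutting pass slices the classified list into maximal same-type runs.
import Mathlib
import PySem

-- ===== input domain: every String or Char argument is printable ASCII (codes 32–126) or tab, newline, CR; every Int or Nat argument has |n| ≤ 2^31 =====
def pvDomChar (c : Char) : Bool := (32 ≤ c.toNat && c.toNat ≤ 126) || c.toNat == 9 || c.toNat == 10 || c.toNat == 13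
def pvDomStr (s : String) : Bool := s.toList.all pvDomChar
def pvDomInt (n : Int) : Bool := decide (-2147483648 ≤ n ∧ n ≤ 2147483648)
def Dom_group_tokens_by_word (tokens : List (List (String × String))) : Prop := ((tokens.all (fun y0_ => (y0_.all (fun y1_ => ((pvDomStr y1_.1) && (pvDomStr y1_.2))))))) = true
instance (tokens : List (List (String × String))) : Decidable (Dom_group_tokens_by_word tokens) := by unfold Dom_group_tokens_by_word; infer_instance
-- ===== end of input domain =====

-- B replaces A's stateful accumulator loop by a classify-then-group two-stage pipeline (alternative decomposition, same cost).


-- ===== PORT A =====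
-- token['k'] (dict lookup; first match on the association list); '.getD ""' is only reached where Python raises KeyError (excluded by Pre_)
def pvTokGetA (token : List (String × String)) (k : String) : String :=
  (List.lookup k token).getD ""

-- the loop body of A: state = (groups, current_group, current_type)
def pvStepA (st : (List (String × (List (List (String × String))))) × (List (List (String × String))) × Option String)
    (token : List (String × String)) :
    (List (String × (List (List (String × String))))) × (List (List (String × String))) × Option String :=
  let groups := st.1
  let current_group := st.2.1
  let current_type := st.2.2
  if pvTokGetA token "type" == "ansi" then
    if current_group ≠ [] then (groups, current_group ++ [token], current_type)
    else (groups, [token], some "word")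
  else
    if PySem.Str.strIsspace (pvTokGetA token "value") then
      if current_group ≠ [] ∧ current_type = some "space" then (groups, current_group ++ [token], current_type)
      else if current_group ≠ [] ∧ current_type = some "word" then
        (groups ++ [(current_type.getD "", current_group)], [token], some "space")
      else (groups, [token], some "space")
    else
      if current_group ≠ [] ∧ current_type = some "word" then (groups, current_group ++ [token], current_type)
      else if current_group ≠ [] ∧ current_type = some "space" then
        (groups ++ [(current_type.getD "", current_group)], [token], some "word")
      else (groups, [token], some "word")

-- the trailing 'if current_group: groups.append((current_type, current_group))'
def pvFinA (st : (List (String × (List (List (String × String))))) × (List (List (String × String))) × Option String) :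
    List (String × (List (List (String × String)))) :=
  if st.2.1 ≠ [] then st.1 ++ [(st.2.2.getD "", st.2.1)] else st.1

def group_tokens_by_word (tokens : List (List (String × String))) : List (String × (List (List (String × String)))) :=
  pvFinA (tokens.foldl pvStepA ([], [], none))

-- ===== PORT B =====
-- classify one token given the running type
def pvCls (cur : Option String) (token : List (String × String)) : String :=
  if (List.lookup "type" token).getD "" == "ansi" then cur.getD "word"
  else if PySem.Str.strIsspace ((List.lookup "value" token).getD "") then "space" else "word"

-- stage 2: cut the classified list into maximal same-type runs
def pvRuns : List (String × (List (String × String))) → List (String × (List (List (String × String))))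
  | [] => []
  | (ty, t) :: rest =>
    (ty, t :: (rest.takeWhile (fun p => p.1 == ty)).map Prod.snd) ::
      pvRuns (rest.dropWhile (fun p => p.1 == ty))
termination_by ps => ps.length
decreasing_by
  simp only [List.length_cons]
  exact Nat.lt_succ_of_le (List.length_dropWhile_le _ _)

def group_tokens_by_word_alt (tokens : List (List (String × String))) : List (String × (List (List (String × String)))) :=
  -- stage 1: the classification loop (pairs accumulator, running type)
  let pairs := (tokens.foldl
    (fun (st : List (String × (List (String × String))) × Option String) t =>
      let ty := pvCls st.2 t
      (st.1 ++ [(ty, t)], some ty))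
    ([], none)).1
  pvRuns pairs

-- ===== PRECONDITION & SPEC =====
-- Pre_ excludes exactly the inputs where A raises KeyError: a token without a 'type' key, or a non-ANSI token without a 'value' key.
def Pre_group_tokens_by_word (tokens : List (List (String × String))) : Prop :=
  ∀ token ∈ tokens, (List.lookup "type" token).isSome = true ∧
    (List.lookup "type" token ≠ some "ansi" → (List.lookup "value" token).isSome = true)
instance (tokens : List (List (String × String))) : Decidable (Pre_group_tokens_by_word tokens) := by
  unfold Pre_group_tokens_by_word; infer_instance

def pvWitness_group_tokens_by_word : (List (List (String × String))) :=
  [[("type", "char"), ("value", "a")], [("type", "ansi"), ("value", "[0m")], [("type", "char"), ("value", " ")]]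

def Spec_group_tokens_by_word (tokens : List (List (String × String))) (out : List (String × (List (List (String × String))))) : Prop := out = group_tokens_by_word_alt tokens
instance (tokens : List (List (String × String))) (out : List (String × (List (List (String × String))))) : Decidable (Spec_group_tokens_by_word tokens out) := by unfold Spec_group_tokens_by_word; infer_instance

-- ===== CLAIM (what is proved, stated in full; the proofs are below) =====
def Claim_equal_group_tokens_by_word : Prop := ∀ (tokens : List (List (String × String))), Dom_group_tokens_by_word tokens → Pre_group_tokens_by_word tokens → Spec_group_tokens_by_word tokens (group_tokens_by_word tokens)

-- ===== LEMMAS AND PROOFS =====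

-- stage 1 of B, written as a structural recursion (equal to the foldl form)
def pvClassify (cur : Option String) : List (List (String × String)) → List (String × (List (String × String)))
  | [] => []
  | t :: ts => let ty := pvCls cur t; (ty, t) :: pvClassify (some ty) ts

lemma pvClassify_foldl (tokens : List (List (String × String)))
    (ps : List (String × (List (String × String)))) (cur : Option String) :
    (tokens.foldl
      (fun (st : List (String × (List (String × String))) × Option String) t =>
        let ty := pvCls st.2 t
        (st.1 ++ [(ty, t)], some ty))
      (ps, cur)).1 = ps ++ pvClassify cur tokens := by
  induction tokens generalizing ps cur with
  | nil => simp [pvClassify]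
  | cons t ts ih => simp [pvClassify, ih, List.append_assoc]

lemma pvCls_mem (cur : Option String) (t : List (String × String))
    (h : cur = some "word" ∨ cur = some "space" ∨ cur = none) :
    pvCls cur t = "word" ∨ pvCls cur t = "space" := by
  unfold pvCls
  rcases h with h | h | h <;> subst h <;> split_ifs <;> simp

-- A's loop body, from a nonempty group of type ty ∈ {word, space}: append if the token
-- classifies to ty, otherwise close the group and start a fresh one of the new type.
lemma pvStepA_eq (gs : List (String × (List (List (String × String)))))
    (g : List (List (String × String))) (ty : String) (t : List (String × String))
    (hg : g ≠ []) (hty : ty = "word" ∨ ty = "space") :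
    pvStepA (gs, g, some ty) t =
      (if pvCls (some ty) t = ty then (gs, g ++ [t], some ty)
       else (gs ++ [(ty, g)], [t], some (pvCls (some ty) t))) := by
  rcases hty with h | h <;> subst h <;>
    unfold pvStepA pvCls pvTokGetA <;>
      split_ifs <;> simp_all

lemma pvStepA_start (t : List (String × String)) :
    pvStepA ([], [], none) t = ([], [t], some (pvCls none t)) := by
  unfold pvStepA pvCls pvTokGetA
  split_ifs <;> simp_all

-- A's loop, run from a nonempty current group of type ty ∈ {word, space}, produces
-- the pending group extended by the matching prefix of B's classification, then B's runs.
lemma pvA_loop (rest : List (List (String × String)))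
    (gs : List (String × (List (List (String × String)))))
    (g : List (List (String × String))) (ty : String)
    (hg : g ≠ []) (hty : ty = "word" ∨ ty = "space") :
    pvFinA (rest.foldl pvStepA (gs, g, some ty)) =
      gs ++ (ty, g ++ ((pvClassify (some ty) rest).takeWhile (fun p => p.1 == ty)).map Prod.snd) ::
        pvRuns ((pvClassify (some ty) rest).dropWhile (fun p => p.1 == ty)) := by
  induction rest generalizing gs g ty with
  | nil => simp [pvFinA, hg, pvClassify, pvRuns]
  | cons t ts ih =>
    have hty' : pvCls (some ty) t = "word" ∨ pvCls (some ty) t = "space" :=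
      pvCls_mem _ _ (by rcases hty with h | h <;> simp [h])
    have hcl : pvClassify (some ty) (t :: ts) =
        (pvCls (some ty) t, t) :: pvClassify (some (pvCls (some ty) t)) ts := rfl
    rw [List.foldl_cons, pvStepA_eq gs g ty t hg hty]
    by_cases hEq : pvCls (some ty) t = ty
    · rw [if_pos hEq, ih gs (g ++ [t]) ty (by simp) hty, hcl, hEq]
      simp
    · rw [if_neg hEq, ih _ [t] _ (by simp) hty', hcl]
      have hne : (pvCls (some ty) t == ty) = false := by simp [hEq]
      simp only [List.takeWhile_cons, List.dropWhile_cons, hne, Bool.false_eq_true,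
        if_false, List.map_nil, List.append_nil]
      rw [pvRuns.eq_2]
      simp

theorem pv_main (tokens : List (List (String × String))) :
    group_tokens_by_word tokens = group_tokens_by_word_alt tokens := by
  unfold group_tokens_by_word group_tokens_by_word_alt
  rw [pvClassify_foldl]
  show pvFinA (tokens.foldl pvStepA ([], [], none)) = pvRuns (pvClassify none tokens)
  cases tokens with
  | nil => simp [pvFinA, pvClassify, pvRuns]
  | cons t ts =>
    have hty0 : pvCls none t = "word" ∨ pvCls none t = "space" :=
      pvCls_mem _ _ (by simp)
    have hcl : pvClassify none (t :: ts) =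
        (pvCls none t, t) :: pvClassify (some (pvCls none t)) ts := rfl
    rw [List.foldl_cons, pvStepA_start, pvA_loop ts [] [t] _ (by simp) hty0, hcl]
    conv_rhs => rw [pvRuns.eq_2]
    simp

-- ===== VERDICT (by name: the statement is the Claim_ definition above) =====
theorem group_tokens_by_word_spec : Claim_equal_group_tokens_by_word := by
  intro tokens _ _
  unfold Spec_group_tokens_by_word
  exact pv_main tokens
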